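-- pv_equiv track=rewrite | github.com/theaeolianmachine/aoc2024 | day21/day21.py | get_keypresses
-- ===== SOURCE A (Python) =====
-- def get_keypresses(
--     path: str, keypad: dict[str, tuple[int, int]], to_keypad: dict[str, tuple[int, int]]
-- ) -> str:
--     rev_to_keypad: dict[tuple[int, int], str] = {v: k for k, v in to_keypad.items()}
--     activations: list[str] = []
--     cur_ri, cur_ci = to_keypad["A"]
--     for step in path:
--         if step == "<":
--             cur_ci -= 1
--         elif step == "^":
--             cur_ri -= 1
--         elif step == ">":
--             cur_ci += 1
--         elif step == "v":
--             cur_ri += 1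
--         elif step == "A":
--             activations.append(rev_to_keypad[(cur_ri, cur_ci)])
--     return "".join(activations)
-- ===== SOURCE B (Python) =====
-- def get_keypresses(
--     path: str, keypad: dict[str, tuple[int, int]], to_keypad: dict[str, tuple[int, int]]
-- ) -> str:
--     def key_at(pos):
--         key, found = "", False
--         for k, v in to_keypad.items():
--             if v == pos:
--                 key, found = k, True
--         if not found:
--             raise KeyError(pos)
--         return key
--
--     ri, ci = to_keypad["A"]
--     keys = []
--     for seg in path.split("A")[:-1]:
--         ri += seg.count("v") - seg.count("^")
--         ci += seg.count(">") - seg.count("<")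
--         keys.append(key_at((ri, ci)))
--     return "".join(keys)
-- ===== Notes on version B (the rewrite author's own statement) =====
-- stated objective: alternative
-- what changed: Replaces A's per-character branch loop and precomputed reversed dict by a tokenize-then-aggregate pass: split the path on 'A', jump by each segment's net displacement computed from character counts, and resolve each activated position by a last-match linear scan over to_keypad's items instead of a reverse dictionary.
import Mathlib
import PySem

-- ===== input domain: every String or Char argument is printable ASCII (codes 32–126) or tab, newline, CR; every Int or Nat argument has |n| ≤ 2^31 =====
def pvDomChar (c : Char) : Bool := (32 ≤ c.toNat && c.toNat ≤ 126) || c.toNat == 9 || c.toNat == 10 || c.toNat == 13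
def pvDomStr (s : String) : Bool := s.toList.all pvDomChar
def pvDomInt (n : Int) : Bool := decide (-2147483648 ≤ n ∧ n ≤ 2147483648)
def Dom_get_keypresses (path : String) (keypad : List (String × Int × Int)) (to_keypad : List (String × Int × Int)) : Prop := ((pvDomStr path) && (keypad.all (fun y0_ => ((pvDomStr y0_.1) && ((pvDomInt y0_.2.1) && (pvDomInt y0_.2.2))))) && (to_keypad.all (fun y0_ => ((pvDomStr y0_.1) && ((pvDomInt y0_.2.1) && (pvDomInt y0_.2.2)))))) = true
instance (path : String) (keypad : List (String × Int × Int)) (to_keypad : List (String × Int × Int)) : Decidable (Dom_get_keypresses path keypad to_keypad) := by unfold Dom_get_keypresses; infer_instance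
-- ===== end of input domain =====

-- B replaces A's per-character branch loop (and its reversed dict) by a split-on-'A' pass that jumps
-- by each segment's net character-count displacement and looks keys up by a last-match value scan;
-- objective: alternative decomposition, same cost.


-- ===== PORT A =====
-- A-side helper: the body of A's 'for step in path' loop, state = (cur_ri, cur_ci, activations).
-- rev[(ri,ci)] raises KeyError when absent; the port reads getD "" there, excluded by Pre_.
def aStep (rev : PySem.Dict (Int × Int) String) (s : Int × Int × List String) (step : Char) :
    Int × Int × List String :=
  if step = '<' then (s.1, s.2.1 - 1, s.2.2)
  else if step = '^' then (s.1 - 1, s.2.1, s.2.2)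
  else if step = '>' then (s.1, s.2.1 + 1, s.2.2)
  else if step = 'v' then (s.1 + 1, s.2.1, s.2.2)
  else if step = 'A' then (s.1, s.2.1, s.2.2 ++ [(rev.get? (s.1, s.2.1)).getD ""])
  else s

def get_keypresses (path : String) (keypad : List (String × Int × Int)) (to_keypad : List (String × Int × Int)) : String :=
  let tk := PySem.Dict.ofList to_keypad
  let rev := tk.items.foldl (fun d p => d.insert p.2 p.1) PySem.Dict.empty
  let start := (tk.get? "A").getD (0, 0)   -- to_keypad["A"]: KeyError (none) excluded by Pre_
  let st := path.toList.foldl (aStep rev) (start.1, start.2, [])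
  PySem.Str.join "" st.2.2

-- ===== PORT B =====
-- B's key_at: linear scan over to_keypad.items() keeping the LAST pair whose value equals pos;
-- the (key, found) pair of the Python is the Option (none = not found = KeyError, excluded by Pre_).
def bKeyAt (items : List (String × Int × Int)) (pos : Int × Int) : Option String :=
  items.foldl (fun acc p => if p.2 = pos then some p.1 else acc) none

-- B-side loop body: 'for seg in path.split("A")[:-1]', advancing by the segment's counts.
def bSeg (items : List (String × Int × Int)) (s : Int × Int × List String) (seg : List Char) :
    Int × Int × List String :=
  let r := s.1 + (seg.count 'v' : Int) - (seg.count '^' : Int)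
  let c := s.2.1 + (seg.count '>' : Int) - (seg.count '<' : Int)
  (r, c, s.2.2 ++ [(bKeyAt items (r, c)).getD ""])

def get_keypresses_alt (path : String) (keypad : List (String × Int × Int)) (to_keypad : List (String × Int × Int)) : String :=
  let items := (PySem.Dict.ofList to_keypad).items
  let start := ((PySem.Dict.ofList to_keypad).get? "A").getD (0, 0)
  let segs := PySem.Chars.splitOn path.toList ['A']   -- path.split("A"), elementwise toList
  let st := segs.dropLast.foldl (bSeg items) (start.1, start.2, [])   -- segs[:-1]
  PySem.Str.join "" st.2.2

-- ===== PRECONDITION & SPEC =====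
-- Pre_ excludes exactly the inputs where the Python A raises a KeyError: "A" missing from
-- to_keypad, or some activation (a position reached at an 'A' step) not a value of to_keypad.
def Pre_get_keypresses (path : String) (keypad : List (String × Int × Int)) (to_keypad : List (String × Int × Int)) : Prop :=
  let tk := PySem.Dict.ofList to_keypad
  let chars := path.toList
  let r0 := (tk.getD "A" (0, 0)).1
  let c0 := (tk.getD "A" (0, 0)).2
  tk.contains "A" = true ∧
  ∀ i < chars.length, chars[i]? = some 'A' →
    (r0 + ((chars.take i).count 'v' : Int) - ((chars.take i).count '^' : Int),
     c0 + ((chars.take i).count '>' : Int) - ((chars.take i).count '<' : Int)) ∈ tk.values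
instance (path : String) (keypad : List (String × Int × Int)) (to_keypad : List (String × Int × Int)) : Decidable (Pre_get_keypresses path keypad to_keypad) := by unfold Pre_get_keypresses; infer_instance

def pvWitness_get_keypresses : String × (List (String × Int × Int)) × (List (String × Int × Int)) :=
  (">A<vA", [], [("A", (0, 1)), ("0", (0, 2)), ("1", (1, 1))])

def Spec_get_keypresses (path : String) (keypad : List (String × Int × Int)) (to_keypad : List (String × Int × Int)) (out : String) : Prop := out = get_keypresses_alt path keypad to_keypad
instance (path : String) (keypad : List (String × Int × Int)) (to_keypad : List (String × Int × Int)) (out : String) : Decidable (Spec_get_keypresses path keypad to_keypad out) := by unfold Spec_get_keypresses; infer_instance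

-- ===== CLAIM (what is proved, stated in full; the proofs are below) =====
def Claim_equal_get_keypresses : Prop := ∀ (path : String) (keypad : List (String × Int × Int)) (to_keypad : List (String × Int × Int)), Dom_get_keypresses path keypad to_keypad → Pre_get_keypresses path keypad to_keypad → Spec_get_keypresses path keypad to_keypad (get_keypresses path keypad to_keypad)

-- ===== LEMMAS AND PROOFS =====

-- A's reversed dict and B's last-match scan agree: generalized over the fold's start.
theorem foldl_insert_get_eq (items : List (String × Int × Int))
    (d : PySem.Dict (Int × Int) String) (x : Int × Int) :
    (items.foldl (fun d p => d.insert p.2 p.1) d).get? x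
      = items.foldl (fun acc p => if p.2 = x then some p.1 else acc) (d.get? x) := by
  induction items generalizing d with
  | nil => rfl
  | cons p t ih =>
    simp only [List.foldl_cons]
    rw [ih]
    rw [PySem.Dict.get?_insert]
    by_cases h : p.2 = x
    · simp [h]
    · rw [if_neg (fun hx => h hx.symm), if_neg h]

theorem rev_get_eq_bKeyAt (items : List (String × Int × Int)) (x : Int × Int) :
    (items.foldl (fun d p => d.insert p.2 p.1) PySem.Dict.empty).get? x = bKeyAt items x := by
  rw [foldl_insert_get_eq]; rfl

-- Reference splitter: path split on the single character 'A', structurally.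
def pvSplitA : List Char → List (List Char)
  | [] => [[]]
  | c :: t => if c = 'A' then [] :: pvSplitA t else (pvSplitA t).modifyHead (c :: ·)

theorem pvSplitA_ne_nil (l : List Char) : pvSplitA l ≠ [] := by
  induction l with
  | nil => simp [pvSplitA]
  | cons c t ih =>
    simp only [pvSplitA]
    split
    · simp
    · cases h : pvSplitA t with
      | nil => exact absurd h ih
      | cons s ss => simp

theorem pvSplitA_go (fuel : Nat) (l cur : List Char) (acc : List (List Char))
    (h : l.length < fuel) :
    PySem.Chars.splitOn.go ['A'] fuel l cur acc
      = acc.reverse ++ (pvSplitA l).modifyHead (cur.reverse ++ ·) := by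
  induction fuel generalizing l cur acc with
  | zero => omega
  | succ fuel ih =>
    cases l with
    | nil => simp [PySem.Chars.splitOn.go, pvSplitA]
    | cons c t =>
      by_cases hc : c = 'A'
      · subst hc
        have hpre : List.isPrefixOf ['A'] ('A' :: t) = true := by
          simp [List.isPrefixOf]
        simp only [PySem.Chars.splitOn.go, hpre, if_pos]
        rw [show List.drop ['A'].length ('A' :: t) = t from rfl]
        rw [ih t [] (cur.reverse :: acc) (by simpa using Nat.lt_of_succ_lt_succ h)]
        cases hs : pvSplitA t with
        | nil => exact absurd hs (pvSplitA_ne_nil t)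
        | cons s ss => simp [pvSplitA, hs]
      · have hAc : ('A' == c) = false := beq_eq_false_iff_ne.mpr (Ne.symm hc)
        have hpre : List.isPrefixOf ['A'] (c :: t) = false := by
          simp [List.isPrefixOf, hAc]
        simp only [PySem.Chars.splitOn.go, hpre, Bool.false_eq_true, if_false]
        rw [ih t (c :: cur) acc (by simpa using Nat.lt_of_succ_lt_succ h)]
        cases hs : pvSplitA t with
        | nil => exact absurd hs (pvSplitA_ne_nil t)
        | cons s ss => simp [pvSplitA, hs, hc]

theorem splitOn_eq_pvSplitA (l : List Char) :
    PySem.Chars.splitOn l ['A'] = pvSplitA l := by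
  unfold PySem.Chars.splitOn
  rw [pvSplitA_go (l.length + 1) l [] [] (Nat.lt_succ_self _)]
  cases hs : pvSplitA l with
  | nil => exact absurd hs (pvSplitA_ne_nil l)
  | cons s ss => simp

-- The displacement a single non-activation character contributes in A's loop.
def pvDR (h : Char) : Int := if h = 'v' then 1 else if h = '^' then -1 else 0
def pvDC (h : Char) : Int := if h = '>' then 1 else if h = '<' then -1 else 0

-- Activation list produced from position (r, c), parametric in the lookup function.
def pvActs (f : Int × Int → Option String) : Int → Int → List (List Char) → List String
  | _, _, [] => []
  | r, c, seg :: ss =>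
    ((f (r + (seg.count 'v' : Int) - (seg.count '^' : Int),
         c + (seg.count '>' : Int) - (seg.count '<' : Int))).getD "")
      :: pvActs f (r + (seg.count 'v' : Int) - (seg.count '^' : Int))
                  (c + (seg.count '>' : Int) - (seg.count '<' : Int)) ss

theorem pvActs_congr (f g : Int × Int → Option String) (hfg : ∀ x, f x = g x)
    (r c : Int) (L : List (List Char)) : pvActs f r c L = pvActs g r c L := by
  induction L generalizing r c with
  | nil => rfl
  | cons s ss ih => simp only [pvActs, hfg, ih]

-- B's fold carries the accumulator; pvActs is the same list with it stripped.
theorem foldB_eq_pvActs (items : List (String × Int × Int)) (segs : List (List Char))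
    (r c : Int) (acc : List String) :
    (segs.foldl (bSeg items) (r, c, acc)).2.2 = acc ++ pvActs (bKeyAt items) r c segs := by
  induction segs generalizing r c acc with
  | nil => simp [pvActs]
  | cons seg ss ih =>
    simp only [List.foldl_cons, bSeg, pvActs]
    rw [ih]
    simp

-- Prepending a non-'A' character to the first segment shifts the start by that character's move.
theorem pvActs_cons_char (f : Int × Int → Option String) (h : Char) (hA : h ≠ 'A')
    (r c : Int) (s : List Char) (L : List (List Char)) :
    pvActs f r c ((h :: s) :: L) = pvActs f (r + pvDR h) (c + pvDC h) (s :: L) := by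
  have key : ∀ a : Char, (((h :: s).count a : Int)) = (s.count a : Int) + (if a = h then 1 else 0) := by
    intro a
    by_cases ha : a = h
    · simp [ha]
    · simp [ha, Ne.symm ha]
  have hr : r + ((h :: s).count 'v' : Int) - ((h :: s).count '^' : Int)
      = (r + pvDR h) + (s.count 'v' : Int) - (s.count '^' : Int) := by
    rw [key, key]
    unfold pvDR
    split_ifs <;> subst_vars <;> (try simp_all) <;> omega
  have hc2 : c + ((h :: s).count '>' : Int) - ((h :: s).count '<' : Int)
      = (c + pvDC h) + (s.count '>' : Int) - (s.count '<' : Int) := by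
    rw [key, key]
    unfold pvDC
    split_ifs <;> subst_vars <;> (try simp_all) <;> omega
  simp only [pvActs]
  rw [hr, hc2]

-- Main loop correspondence: A's per-character fold emits exactly B's per-segment activations.
theorem foldA_eq_pvActs (rev : PySem.Dict (Int × Int) String) (chars : List Char)
    (r c : Int) (acc : List String) :
    (chars.foldl (aStep rev) (r, c, acc)).2.2
      = acc ++ pvActs (rev.get? ·) r c (pvSplitA chars).dropLast := by
  induction chars generalizing r c acc with
  | nil => simp [pvSplitA, pvActs]
  | cons h t ih =>
    by_cases hA : h = 'A'
    · subst hA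
      have hstep : aStep rev (r, c, acc) 'A'
          = (r, c, acc ++ [(rev.get? (r, c)).getD ""]) := by
        simp [aStep]
      simp only [List.foldl_cons, hstep]
      rw [ih]
      cases hs : pvSplitA t with
      | nil => exact absurd hs (pvSplitA_ne_nil t)
      | cons s ss =>
        simp [pvSplitA, hs, pvActs]
    · have hstep : aStep rev (r, c, acc) h = (r + pvDR h, c + pvDC h, acc) := by
        unfold aStep pvDR pvDC
        split_ifs <;> simp_all <;> ring_nf
      simp only [List.foldl_cons, hstep]
      rw [ih]
      cases hs : pvSplitA t with
      | nil => exact absurd hs (pvSplitA_ne_nil t)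
      | cons s ss =>
        simp only [pvSplitA, hs, if_neg hA, List.modifyHead]
        cases ss with
        | nil => simp [List.dropLast, pvActs]
        | cons s2 ss2 =>
          rw [show ((h :: s) :: s2 :: ss2 : List (List Char)).dropLast
                = (h :: s) :: (s2 :: ss2).dropLast from rfl,
              show (s :: s2 :: ss2 : List (List Char)).dropLast
                = s :: (s2 :: ss2).dropLast from rfl]
          exact congrArg (acc ++ ·) (pvActs_cons_char (rev.get? ·) h hA r c s ((s2 :: ss2).dropLast)).symm

-- ===== VERDICT (by name: the statement is the Claim_ definition above) =====
theorem get_keypresses_spec : Claim_equal_get_keypresses := by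
  intro path keypad to_keypad _ _
  unfold Spec_get_keypresses
  simp only [get_keypresses, get_keypresses_alt, splitOn_eq_pvSplitA,
    foldA_eq_pvActs, foldB_eq_pvActs, List.nil_append]
  exact congrArg (PySem.Str.join "")
    (pvActs_congr _ _ (rev_get_eq_bKeyAt (PySem.Dict.ofList to_keypad).items) _ _ _)
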